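-- pv_equiv track=rewrite | github.com/Raymond-Riddell/AI1-HW3 | pancakes.py | flip_stack
-- ===== SOURCE A (Python) =====
-- def flip_stack(stack, p):
--     '''Flip p pancakes in an ordered stack.'''
--     # strategy here is to take p pancakes off of the stack, add them to a queue,
--     # and add p items from the queue back onto the stack, which will result in the
--     # p number of pancakes flipped on the stack
--
--     # temp queue
--     queue = []
--     stack_copy = stack.copy()
--
--     # popping p items of the stack
--     for _ in range(p):
--         queue.insert(0, stack_copy.pop(0))
--
--     # popping all items from the stack back onto the queue
--     for _ in range(len(queue)):
--         stack_copy.insert(0, queue.pop())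
--
--     return stack_copy
-- ===== SOURCE B (Python) =====
-- def flip_stack(stack, p):
--     '''Flip p pancakes in an ordered stack.'''
--     new = stack.copy()
--     for i in range(p):
--         new[i] = stack[p - 1 - i]
--     return new
-- ===== Notes on version B (the rewrite author's own statement) =====
-- stated objective: faster
-- what changed: Replaces A's two-pass queue transfer (pop p items off the front into a temp queue, then pop them all back) with a single indexed loop that writes the reversed prefix values directly into a copy of the stack.
import Mathlib
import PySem

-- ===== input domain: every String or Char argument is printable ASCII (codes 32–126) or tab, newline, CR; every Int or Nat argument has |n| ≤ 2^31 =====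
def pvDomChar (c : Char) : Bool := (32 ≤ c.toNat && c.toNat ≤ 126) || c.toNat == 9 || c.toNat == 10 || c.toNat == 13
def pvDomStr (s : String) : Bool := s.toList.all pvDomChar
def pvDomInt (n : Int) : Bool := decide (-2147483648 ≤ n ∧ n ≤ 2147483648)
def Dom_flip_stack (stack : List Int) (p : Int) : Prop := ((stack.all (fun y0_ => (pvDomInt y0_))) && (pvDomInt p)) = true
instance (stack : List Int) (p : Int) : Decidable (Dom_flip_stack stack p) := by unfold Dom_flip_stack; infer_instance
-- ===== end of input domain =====

-- B replaces A's two-pass queue transfer with one indexed loop writing the reversed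
-- prefix into a copy of the stack, avoiding A's repeated O(n) pop(0)/insert(0) shifts (objective: faster, measured).

-- ===== PORT A =====
-- for _ in range(p): queue.insert(0, stack_copy.pop(0))      state = (queue, stack_copy)
def flipStackLoop1 (st : List Int × List Int) (_i : Int) : List Int × List Int :=
  match PySem.List.pop? st.2 0 with
  | some (x, rest) => (PySem.List.insert st.1 0 x, rest)
  | none => st   -- Python raises IndexError here; excluded by Pre_

-- for _ in range(len(queue)): stack_copy.insert(0, queue.pop())
def flipStackLoop2 (st : List Int × List Int) (_i : Int) : List Int × List Int :=
  match PySem.List.pop? st.1 (-1) with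
  | some (x, q') => (q', PySem.List.insert st.2 0 x)
  | none => st   -- Python raises IndexError here; unreachable (the loop runs len(queue) times)

def flipStackPhase2 (st : List Int × List Int) : List Int × List Int :=
  (PySem.List.pyRange 0 (st.1.length : Int) 1).foldl flipStackLoop2 st

def flip_stack (stack : List Int) (p : Int) : List Int :=
  (flipStackPhase2 ((PySem.List.pyRange 0 p 1).foldl flipStackLoop1 ([], stack))).2

-- ===== PORT B =====
-- new = stack.copy(); for i in range(p): new[i] = stack[p-1-i]; return new
def flip_stack_alt (stack : List Int) (p : Int) : List Int :=
  (PySem.List.pyRange 0 p 1).foldl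
    (fun newl i =>
      match PySem.List.pyGet? stack (p - 1 - i) with
      | some v => PySem.List.pySetD newl i v
        -- pySetD is exact here: under Pre_, 0 ≤ i < p ≤ len(stack) = len(newl), so the
        -- Python assignment new[i] = v cannot raise
      | none => newl)  -- Python raises IndexError here; excluded by Pre_
    stack

-- ===== PRECONDITION & SPEC =====
-- Pre_ excludes exactly p > len(stack), where both Pythons raise IndexError.
def Pre_flip_stack (stack : List Int) (p : Int) : Prop := p ≤ (stack.length : Int)
instance (stack : List Int) (p : Int) : Decidable (Pre_flip_stack stack p) := by
  unfold Pre_flip_stack; infer_instance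

def pvWitness_flip_stack : List Int × Int := ([1, 2, 3], 2)

def Spec_flip_stack (stack : List Int) (p : Int) (out : List Int) : Prop := out = flip_stack_alt stack p
instance (stack : List Int) (p : Int) (out : List Int) : Decidable (Spec_flip_stack stack p out) := by unfold Spec_flip_stack; infer_instance

-- ===== CLAIM (what is proved, stated in full; the proofs are below) =====
def Claim_equal_flip_stack : Prop := ∀ (stack : List Int) (p : Int), Dom_flip_stack stack p → Pre_flip_stack stack p → Spec_flip_stack stack p (flip_stack stack p)

-- ===== LEMMAS AND PROOFS =====

-- a fold whose step ignores the list element is an iterate of the step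
theorem pvFoldlIgnore {α β : Type} (g : β → α → β) (f : β → β)
    (hf : ∀ st i, g st i = f st) :
    ∀ (l : List α) (init : β), l.foldl g init = f^[l.length] init := by
  intro l
  induction l with
  | nil => intro init; rfl
  | cons x xs ih =>
      intro init
      simp [List.foldl_cons, hf, ih, Function.iterate_succ_apply]

-- loop 1 transfers the first n elements of the stack onto the queue, reversing them
theorem pvLoop1Iter : ∀ (n : Nat) (q s : List Int), n ≤ s.length →
    (fun st => flipStackLoop1 st 0)^[n] (q, s) = ((s.take n).reverse ++ q, s.drop n) := by
  intro n
  induction n with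
  | zero => intro q s _; simp
  | succ m ih =>
      intro q s hn
      cases s with
      | nil => simp at hn
      | cons x rest =>
          rw [Function.iterate_succ_apply]
          have hstep : flipStackLoop1 (q, x :: rest) 0 = (x :: q, rest) := by
            simp [flipStackLoop1, PySem.List.pop?_zero_cons, PySem.List.insert,
                  PySem.List.sliceIndices]
          rw [hstep, ih (x :: q) rest (by simpa using hn)]
          simp

-- loop 2 pops the whole queue (from the back) onto the stack
theorem pvLoop2Iter : ∀ (q s : List Int),
    (fun st => flipStackLoop2 st 0)^[q.length] (q, s) = ([], q ++ s) := by
  intro q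
  induction q using List.reverseRecOn with
  | nil => intro s; simp
  | append_singleton q' x ih =>
      intro s
      rw [List.length_append, List.length_cons, List.length_nil,
          Function.iterate_succ_apply]
      have hstep : flipStackLoop2 (q' ++ [x], s) 0 = (q', x :: s) := by
        simp [flipStackLoop2, PySem.List.pop?_last, PySem.List.insert,
              PySem.List.sliceIndices]
      rw [hstep, ih (x :: s)]
      simp

-- A returns the reversed p-prefix followed by the rest
theorem pvFlipStackA (stack : List Int) (p : Int) (hp : p ≤ (stack.length : Int)) :
    flip_stack stack p = (stack.take p.toNat).reverse ++ stack.drop p.toNat := by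
  unfold flip_stack flipStackPhase2
  rw [pvFoldlIgnore flipStackLoop1 (fun st => flipStackLoop1 st 0) (fun _ _ => rfl),
      PySem.List.length_pyRange_one]
  have h1 : (fun st => flipStackLoop1 st 0)^[(p - 0).toNat] (([] : List Int), stack)
      = ((stack.take p.toNat).reverse, stack.drop p.toNat) := by
    have := pvLoop1Iter (p - 0).toNat [] stack (by omega)
    simpa [show (p - 0).toNat = p.toNat from by omega] using this
  rw [h1]
  rw [pvFoldlIgnore flipStackLoop2 (fun st => flipStackLoop2 st 0) (fun _ _ => rfl),
      PySem.List.length_pyRange_one]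
  have hlen : (((((stack.take p.toNat).reverse).length : Int)) - 0).toNat
      = ((stack.take p.toNat).reverse).length := by omega
  rw [hlen, pvLoop2Iter]

-- one write of B's loop extends the written prefix by one slot
theorem pvSetStep (R s : List Int) (m : Nat) (hmR : m < R.length) (hms : m < s.length) :
    (R.take m ++ s.drop m).set m (R[m]) = R.take (m+1) ++ s.drop (m+1) := by
  rw [List.drop_eq_getElem_cons hms]
  rw [List.set_append_right _ _ (by simp [Nat.min_eq_left hmR.le])]
  have h0 : m - (List.take m R).length = 0 := by simp [Nat.min_eq_left hmR.le]
  have ht : List.take (m+1) R = List.take m R ++ [R[m]] := by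
    rw [List.take_add_one, List.getElem?_eq_getElem hmR]; rfl
  rw [h0, List.set_cons_zero, ht, List.append_assoc]
  rfl

-- invariant of B's loop: after the first k indices, the first k slots hold the
-- reversed n-prefix and the rest is still the original stack
theorem pvLoopBInv (stack : List Int) (p : Int) (n : Nat) (hpn : p = (n : Int))
    (hn : n ≤ stack.length) :
    ∀ (k : Nat), k ≤ n →
    (PySem.List.pyRange 0 (k : Int) 1).foldl
      (fun newl i =>
        match PySem.List.pyGet? stack (p - 1 - i) with
        | some v => PySem.List.pySetD newl i v
        | none => newl) stack
    = ((stack.take n).reverse.take k) ++ stack.drop k := by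
  intro k
  induction k with
  | zero => intro _; simp [PySem.List.pyRange_one_eq_nil]
  | succ m ih =>
      intro hk
      have hm : m ≤ n := by omega
      have hcast : ((m + 1 : Nat) : Int) = (m : Int) + 1 := by push_cast; ring
      rw [hcast, PySem.List.pyRange_one_succ_right (by positivity), List.foldl_append,
          ih hm]
      simp only [List.foldl_cons, List.foldl_nil]
      have hidx : p - 1 - (m : Int) = ((n - 1 - m : Nat) : Int) := by
        subst hpn; omega
      have hlt : n - 1 - m < stack.length := by omega
      rw [hidx, PySem.List.pyGet?_natCast stack (n - 1 - m),
          List.getElem?_eq_getElem hlt]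
      have hRlen : m < ((stack.take n).reverse).length := by
        simp [Nat.min_eq_left hn]; omega
      have hRval : stack[n - 1 - m]'hlt = ((stack.take n).reverse)[m]'hRlen := by
        simp only [List.getElem_reverse, List.getElem_take]
        congr 1
        simp [Nat.min_eq_left hn]
      simp only [PySem.List.pySetD_natCast, hRval]
      exact pvSetStep ((stack.take n).reverse) stack m hRlen (by omega)

-- B returns the reversed p-prefix followed by the rest
theorem pvFlipStackB (stack : List Int) (p : Int) (hp : p ≤ (stack.length : Int)) :
    flip_stack_alt stack p = (stack.take p.toNat).reverse ++ stack.drop p.toNat := by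
  unfold flip_stack_alt
  by_cases hneg : p ≤ 0
  · rw [PySem.List.pyRange_one_eq_nil hneg]
    simp [show p.toNat = 0 from by omega]
  · obtain ⟨n, rfl⟩ : ∃ n : Nat, p = (n : Int) := ⟨p.toNat, by omega⟩
    have hn : n ≤ stack.length := by exact_mod_cast hp
    rw [pvLoopBInv stack (n : Int) n rfl hn n le_rfl]
    have : ((stack.take n).reverse).length ≤ n := by simp [Nat.min_eq_left hn]
    rw [List.take_of_length_le this]
    simp

-- ===== VERDICT (by name: the statement is the Claim_ definition above) =====
theorem flip_stack_spec : Claim_equal_flip_stack := by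
  intro stack p _dom hpre
  unfold Spec_flip_stack
  rw [pvFlipStackA stack p hpre, pvFlipStackB stack p hpre]
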